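-- pv_equiv track=rewrite | github.com/rllabmcgill/rlcourse-april-7-Pperei1 | walk.py | bestAction
-- ===== SOURCE A (Python) =====
-- def bestAction(data):
-- 	bestAction = data[0][0]
-- 	bestScore = data[0][1]
-- 	for i in range(1,len(data)):
-- 		if data[i][1] > bestScore:
-- 			bestAction = data[i][0]
-- 			bestScore = data[i][1]
-- 	return bestScore,bestAction
-- ===== SOURCE B (Python) =====
-- def bestAction(data):
--     ordered = sorted(data, key=lambda x: x[1], reverse=True)
--     best = ordered[0]
--     return best[1], best[0]
-- ===== Notes on version B (the rewrite author's own statement) =====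
-- stated objective: alternative
-- what changed: Replaces the manual index loop tracking a running best with a stable descending sort by score and taking the first element (stability preserves A's first-maximum tie-break).
import Mathlib
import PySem

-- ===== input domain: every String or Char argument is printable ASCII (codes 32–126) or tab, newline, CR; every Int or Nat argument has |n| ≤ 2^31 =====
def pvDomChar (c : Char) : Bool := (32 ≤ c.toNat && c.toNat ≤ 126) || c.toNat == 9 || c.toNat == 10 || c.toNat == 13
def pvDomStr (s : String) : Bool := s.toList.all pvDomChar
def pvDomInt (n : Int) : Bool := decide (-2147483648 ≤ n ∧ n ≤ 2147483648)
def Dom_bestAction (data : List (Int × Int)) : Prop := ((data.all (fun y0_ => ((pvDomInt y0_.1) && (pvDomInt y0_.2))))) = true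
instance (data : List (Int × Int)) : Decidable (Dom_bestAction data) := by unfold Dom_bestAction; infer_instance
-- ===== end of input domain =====

-- B replaces A's manual running-best index loop by a stable descending sort by score
-- and taking the first element; same return value on nonempty input (objective: alternative).

-- ===== PORT A =====
def bestAction (data : List (Int × Int)) : Int × Int :=
  match PySem.List.pyGet? data 0 with
  | none => (0, 0)   -- data[0] raises IndexError on []; excluded by Pre_bestAction
  | some p0 =>
    let st := (PySem.List.pyRange 1 (PySem.List.len data)).foldl
      (fun (b : Int × Int) i =>
        let y := PySem.List.pyGetD data i (0, 0)
        if y.2 > b.2 then (y.1, y.2) else b)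
      (p0.1, p0.2)
    (st.2, st.1)

-- ===== PORT B =====
def bestAction_alt (data : List (Int × Int)) : Int × Int :=
  match PySem.List.sorted data (fun x => x.2) true with
  | [] => (0, 0)     -- ordered[0] raises IndexError on []; excluded by Pre_bestAction
  | best :: _ => (best.2, best.1)

-- ===== PRECONDITION & SPEC =====
-- Pre_ excludes the empty list, on which both A and B raise IndexError.
def Pre_bestAction (data : List (Int × Int)) : Prop := data ≠ []
instance (data : List (Int × Int)) : Decidable (Pre_bestAction data) := by unfold Pre_bestAction; infer_instance
def pvWitness_bestAction : (List (Int × Int)) := [(1, 5), (2, 7), (3, 7)]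
def Spec_bestAction (data : List (Int × Int)) (out : Int × Int) : Prop := out = bestAction_alt data
instance (data : List (Int × Int)) (out : Int × Int) : Decidable (Spec_bestAction data out) := by unfold Spec_bestAction; infer_instance

-- ===== CLAIM (what is proved, stated in full; the proofs are below) =====
def Claim_equal_bestAction : Prop := ∀ (data : List (Int × Int)), Dom_bestAction data → Pre_bestAction data → Spec_bestAction data (bestAction data)

-- ===== LEMMAS AND PROOFS =====

-- The head of the insertion accumulator evolves exactly like A's running best.
theorem pv_head_foldl_insertBy (t : List (Int × Int)) :
    ∀ (h : Int × Int) (rest : List (Int × Int)),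
      ∃ rest', t.foldl (fun acc x => PySem.List.insertBy (fun a b => decide (b.2 < a.2)) x acc) (h :: rest)
        = (t.foldl (fun b y => if b.2 < y.2 then y else b) h) :: rest' := by
  induction t with
  | nil => intro h rest; exact ⟨rest, rfl⟩
  | cons x t ih =>
    intro h rest
    simp only [List.foldl_cons]
    by_cases hc : h.2 < x.2
    · have : PySem.List.insertBy (fun a b => decide (b.2 < a.2)) x (h :: rest) = x :: h :: rest := by
        simp [PySem.List.insertBy, hc]
      rw [this]
      simpa [hc] using ih x (h :: rest)
    · have : PySem.List.insertBy (fun a b => decide (b.2 < a.2)) x (h :: rest)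
          = h :: PySem.List.insertBy (fun a b => decide (b.2 < a.2)) x rest := by
        simp [PySem.List.insertBy, hc]
      rw [this]
      simpa [hc] using ih h _

theorem pv_sorted_rev_head (p : Int × Int) (t : List (Int × Int)) :
    ∃ rest', PySem.List.sorted (p :: t) (fun x => x.2) true
      = (t.foldl (fun b y => if b.2 < y.2 then y else b) p) :: rest' := by
  rw [PySem.List.sorted_rev_eq_foldl_insertBy]
  simpa [PySem.List.insertBy] using pv_head_foldl_insertBy t p []

-- ===== VERDICT (by name: the statement is the Claim_ definition above) =====
theorem bestAction_spec : Claim_equal_bestAction := by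
  intro data _ hpre
  unfold Spec_bestAction
  match data with
  | [] => exact absurd rfl hpre
  | p :: t =>
    obtain ⟨rest', hB⟩ := pv_sorted_rev_head p t
    unfold bestAction bestAction_alt
    rw [hB]
    have hA : PySem.List.pyGet? (p :: t) 0 = some p := by
      simp [PySem.List.pyGet?, PySem.List.pyIdx?]
    rw [hA]
    simp only []
    have hloop :
        (PySem.List.pyRange 1 (PySem.List.len (p :: t))).foldl
          (fun (b : Int × Int) i =>
            let y := PySem.List.pyGetD (p :: t) i (0, 0)
            if y.2 > b.2 then (y.1, y.2) else b)
          (p.1, p.2)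
        = ((p :: t).drop (Int.toNat 1)).foldl (fun (b : Int × Int) y => if y.2 > b.2 then (y.1, y.2) else b) (p.1, p.2) := by
      exact PySem.List.foldl_pyRange_pyGetD (p :: t) (0, 0)
        (fun b y => if y.2 > b.2 then (y.1, y.2) else b) (p.1, p.2) (a := 1) (by norm_num)
    rw [hloop]
    have hf : (fun (b : Int × Int) y => if y.2 > b.2 then (y.1, y.2) else b)
        = (fun (b : Int × Int) y => if b.2 < y.2 then y else b) := by
      funext b y; by_cases h : b.2 < y.2 <;> simp [h, gt_iff_lt]
    rw [hf]
    simp
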